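-- pv_equiv track=rewrite | github.com/stablecaps/eyes3scribe | eyes3scribe/helpo/hstrops.py | get_multiblocks_between_tags
-- ===== SOURCE A (Python) =====
-- def get_multiblocks_between_tags(filetext, start_tag=":::", end_tag=":::"):
--     """
--     Extracts blocks of text between specified start and end tags.
--
--     Args:
--         filetext (str): The text to search within.
--         start_tag (str, optional): The tag marking the start of the text to extract. Defaults to ":::".
--         end_tag (str, optional): The tag marking the end of the text to extract. Defaults to ":::".
--
--     Returns:
--         list: A list of blocks (each block is a list of lines) between the start and end tags.
--
--     Example:
--         >>> text = "Hello\n:::\nWorld\n:::\nGoodbye"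
--         >>> get_multiblocks_between_tags(text)
--         [[':::', 'World', ':::']]
--     """
--     block_holder = []
--     inRecordingMode = False
--     for line in filetext.split("\n"):
--         if not inRecordingMode:
--             if start_tag in line:
--                 inRecordingMode = True
--                 line_holder = [line]
--         elif end_tag in line:
--             inRecordingMode = False
--             line_holder.append(line)
--             block_holder.append(line_holder)
--         else:
--             line_holder.append(line)
--     return block_holder
-- ===== SOURCE B (Python) =====
-- def get_multiblocks_between_tags(filetext, start_tag=":::", end_tag=":::"):
--     blocks = []
--     it = iter(filetext.split("\n"))
--     for line in it:
--         if start_tag in line: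
--             block = [line]
--             for line2 in it:
--                 block.append(line2)
--                 if end_tag in line2:
--                     blocks.append(block)
--                     break
--             else:
--                 break  # unterminated trailing block is discarded
--     return blocks
-- ===== Notes on version B (the rewrite author's own statement) =====
-- stated objective: alternative
-- what changed: Replaces A's boolean recording-mode state machine with explicit marker finding over one shared line iterator: find the next start line, then an inner scan collects lines up to the matching end line (discarding an unterminated tail), and the outer loop resumes after it.
import Mathlib
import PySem

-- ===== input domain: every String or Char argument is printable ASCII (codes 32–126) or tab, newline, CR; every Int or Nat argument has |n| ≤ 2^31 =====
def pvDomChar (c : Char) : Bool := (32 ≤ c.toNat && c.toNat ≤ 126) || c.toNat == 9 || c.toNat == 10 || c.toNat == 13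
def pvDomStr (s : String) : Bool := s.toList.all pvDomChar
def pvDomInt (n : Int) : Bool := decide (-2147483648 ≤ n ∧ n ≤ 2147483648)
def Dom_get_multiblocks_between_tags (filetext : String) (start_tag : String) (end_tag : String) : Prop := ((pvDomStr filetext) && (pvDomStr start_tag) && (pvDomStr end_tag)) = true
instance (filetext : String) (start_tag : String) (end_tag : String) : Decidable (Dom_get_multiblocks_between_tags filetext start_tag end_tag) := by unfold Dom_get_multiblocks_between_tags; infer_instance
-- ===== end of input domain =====

-- B replaces A's boolean recording-mode state machine with explicit start/end marker scanning
-- over one shared iterator (alternative decomposition, same cost).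

-- ===== PORT A =====
-- one loop iteration; state = (block_holder, inRecordingMode, line_holder)
def pvStepA (start_tag end_tag : String)
    (s : List (List String) × Bool × List String) (line : String) :
    List (List String) × Bool × List String :=
  if s.2.1 = false then
    if PySem.Str.isIn start_tag line then (s.1, true, [line]) else s
  else if PySem.Str.isIn end_tag line then
    (s.1 ++ [s.2.2 ++ [line]], false, s.2.2 ++ [line])
  else (s.1, true, s.2.2 ++ [line])

def get_multiblocks_between_tags (filetext : String) (start_tag : String) (end_tag : String) : List (List String) :=
  (((PySem.Str.split? filetext "\n").getD []).foldl (pvStepA start_tag end_tag) ([], false, [])).1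
  -- split? is always `some` here since the separator "\n" is non-empty; getD only totalizes

-- ===== PORT B =====
-- inner for-loop: append lines to `block` until one contains end_tag; none = iterator exhausted
def pvInnerB (end_tag : String) : List String → List String → Option (List String × List String)
  | [], _ => none
  | l :: rest, block =>
    if PySem.Str.isIn end_tag l then some (block ++ [l], rest)
    else pvInnerB end_tag rest (block ++ [l])

theorem pvInnerB_length (end_tag : String) :
    ∀ (lines block b r : List String), pvInnerB end_tag lines block = some (b, r) →
      r.length < lines.length := by
  intro lines
  induction lines with
  | nil => intro block b r h; simp [pvInnerB] at h
  | cons l rest ih =>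
    intro block b r h
    simp only [pvInnerB] at h
    split at h
    · simp only [Option.some.injEq, Prod.mk.injEq] at h
      obtain ⟨-, hr⟩ := h
      simp [← hr]
    · have := ih (block ++ [l]) b r h
      simp; omega

-- outer for-loop over the shared iterator
def pvOuterB (start_tag end_tag : String) : List String → List (List String)
  | [] => []
  | l :: rest =>
    if PySem.Str.isIn start_tag l then
      match h : pvInnerB end_tag rest [l] with
      | none => []
      | some (block, rem) => block :: pvOuterB start_tag end_tag rem
    else pvOuterB start_tag end_tag rest
termination_by lines => lines.length
decreasing_by
  · have := pvInnerB_length end_tag rest [l] block rem h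
    simp; omega
  · simp

def get_multiblocks_between_tags_alt (filetext : String) (start_tag : String) (end_tag : String) : List (List String) :=
  pvOuterB start_tag end_tag ((PySem.Str.split? filetext "\n").getD [])

-- ===== PRECONDITION & SPEC =====
def Spec_get_multiblocks_between_tags (filetext : String) (start_tag : String) (end_tag : String) (out : List (List String)) : Prop := out = get_multiblocks_between_tags_alt filetext start_tag end_tag
instance (filetext : String) (start_tag : String) (end_tag : String) (out : List (List String)) : Decidable (Spec_get_multiblocks_between_tags filetext start_tag end_tag out) := by unfold Spec_get_multiblocks_between_tags; infer_instance

-- ===== CLAIM (what is proved, stated in full; the proofs are below) =====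
def Claim_equal_get_multiblocks_between_tags : Prop := ∀ (filetext : String) (start_tag : String) (end_tag : String), Dom_get_multiblocks_between_tags filetext start_tag end_tag → Spec_get_multiblocks_between_tags filetext start_tag end_tag (get_multiblocks_between_tags filetext start_tag end_tag)

-- ===== LEMMAS AND PROOFS =====

-- A in recording mode behaves as B's inner scan followed by the remaining fold
theorem pvRecCase (start_tag end_tag : String) :
    ∀ (lines : List String) (blocks : List (List String)) (acc : List String),
      ((lines.foldl (pvStepA start_tag end_tag) (blocks, true, acc)).1 =
        match pvInnerB end_tag lines acc with
        | none => blocks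
        | some (b, r) => ((r.foldl (pvStepA start_tag end_tag) (blocks ++ [b], false, b)).1)) := by
  intro lines
  induction lines with
  | nil => intro blocks acc; simp [pvInnerB]
  | cons l rest ih =>
    intro blocks acc
    by_cases he : PySem.Chars.isIn end_tag.toList l.toList = true
    · simp [pvInnerB, pvStepA, he]
    · simp [pvInnerB, pvStepA, he, ih]

-- A in non-recording mode computes B's outer loop (the held-lines state is irrelevant)
theorem pvMainCase (start_tag end_tag : String) (lines : List String) :
    ∀ (blocks : List (List String)) (hold : List String),
      (lines.foldl (pvStepA start_tag end_tag) (blocks, false, hold)).1 =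
        blocks ++ pvOuterB start_tag end_tag lines := by
  suffices H : ∀ (n : Nat) (ls : List String), ls.length ≤ n →
      ∀ (blocks : List (List String)) (hold : List String),
        (ls.foldl (pvStepA start_tag end_tag) (blocks, false, hold)).1 =
          blocks ++ pvOuterB start_tag end_tag ls from H lines.length lines le_rfl
  intro n
  induction n with
  | zero =>
    intro ls hl
    rw [List.length_eq_zero_iff.mp (Nat.le_zero.mp hl)]
    intro blocks hold; simp [pvOuterB]
  | succ n ih =>
    intro ls hl
    cases ls with
    | nil => intro blocks hold; simp [pvOuterB]
    | cons l rest =>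
      intro blocks hold
      simp only [List.length_cons, Nat.add_le_add_iff_right] at hl
      by_cases hs : PySem.Chars.isIn start_tag.toList l.toList = true
      · simp only [List.foldl_cons, pvStepA, PySem.Str.isIn, hs, if_true]
        rw [pvRecCase]
        cases hin : pvInnerB end_tag rest [l] with
        | none =>
          rw [pvOuterB]
          simp only [PySem.Str.isIn, hs, if_true]
          split
          · simp
          · simp_all
        | some p =>
          obtain ⟨b, r⟩ := p
          have hr : r.length ≤ n :=
            Nat.le_of_lt_succ (Nat.lt_of_lt_of_le (pvInnerB_length end_tag rest [l] b r hin)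
              (Nat.le_succ_of_le hl))
          dsimp only
          rw [ih r hr, pvOuterB]
          simp only [PySem.Str.isIn, hs, if_true]
          split
          · simp_all
          · rename_i b' r' h'
            rw [hin] at h'
            injection h' with h'
            injection h' with hb hr'
            subst hb; subst hr'
            simp
      · simp only [List.foldl_cons]
        have hstep : pvStepA start_tag end_tag (blocks, false, hold) l = (blocks, false, hold) := by
          simp [pvStepA, hs]
        rw [hstep, ih rest hl, pvOuterB]
        simp [hs]

-- ===== VERDICT (by name: the statement is the Claim_ definition above) =====
theorem get_multiblocks_between_tags_spec : Claim_equal_get_multiblocks_between_tags := by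
  intro filetext start_tag end_tag _
  unfold Spec_get_multiblocks_between_tags get_multiblocks_between_tags get_multiblocks_between_tags_alt
  rw [pvMainCase]
  simp
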